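-- pv_equiv track=rewrite | github.com/arianasatryan/Style_Breach_Detection | information.py | get_starts_of_paragraphs
-- ===== SOURCE A (Python) =====
-- def get_starts_of_paragraphs(paragraphs):
--     start_of_paragraph = {}
--     i = 1
--     length = 0
--     for item in paragraphs:
--         start_of_paragraph[i] = length
--         i += 1
--         length += (len(item) + 1)
--     return start_of_paragraph
-- ===== SOURCE B (Python) =====
-- def get_starts_of_paragraphs(paragraphs):
--     # Back-to-front: precompute the total length, then walk the paragraphs in
--     # reverse subtracting each contribution, so each paragraph's offset is
--     # total minus the lengths of it and everything after it.
--     total = sum(len(p) + 1 for p in paragraphs)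
--     remaining = total
--     idx = len(paragraphs)
--     pairs = []
--     for p in reversed(paragraphs):
--         remaining -= len(p) + 1
--         pairs.append((idx, remaining))
--         idx -= 1
--     return dict(reversed(pairs))
-- ===== Notes on version B (the rewrite author's own statement) =====
-- stated objective: alternative
-- what changed: Instead of a forward running-sum loop, B precomputes the total length, traverses the paragraphs in reverse subtracting each contribution to obtain offsets back-to-front, and assembles the dict from the reversed pair list.
import Mathlib
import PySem

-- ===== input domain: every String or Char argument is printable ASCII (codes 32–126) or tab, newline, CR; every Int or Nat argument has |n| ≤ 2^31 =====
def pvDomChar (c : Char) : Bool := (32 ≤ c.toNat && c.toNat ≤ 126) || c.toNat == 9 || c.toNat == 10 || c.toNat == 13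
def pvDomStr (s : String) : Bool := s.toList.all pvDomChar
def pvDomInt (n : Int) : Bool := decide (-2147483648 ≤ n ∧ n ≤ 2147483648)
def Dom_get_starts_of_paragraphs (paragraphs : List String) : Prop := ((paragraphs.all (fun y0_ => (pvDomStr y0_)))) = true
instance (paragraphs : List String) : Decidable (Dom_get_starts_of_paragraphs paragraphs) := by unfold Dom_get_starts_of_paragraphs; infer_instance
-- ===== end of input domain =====

-- B replaces A's forward running-sum loop by a back-to-front traversal: precompute the
-- total length, walk the paragraphs in reverse subtracting each contribution, then
-- assemble the dict from the reversed pair list (objective: alternative; same cost).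

-- ===== PORT A =====
-- literal port of A's loop: state (start_of_paragraph, i, length)
def get_starts_of_paragraphs (paragraphs : List String) : List (Int × Int) :=
  (paragraphs.foldl
    (fun (st : PySem.Dict Int Int × Int × Int) item =>
      (st.1.insert st.2.1 st.2.2, st.2.1 + 1, st.2.2 + (PySem.Str.len item + 1)))
    (PySem.Dict.empty, 1, 0)).1.items

-- ===== PORT B =====
def get_starts_of_paragraphs_alt (paragraphs : List String) : List (Int × Int) :=
  -- total = sum(len(p) + 1 for p in paragraphs)
  let total := paragraphs.foldl (fun s p => s + (PySem.Str.len p + 1)) 0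
  -- for p in reversed(paragraphs): remaining -= len(p)+1; pairs.append((idx, remaining)); idx -= 1
  let res := paragraphs.reverse.foldl
    (fun (st : Int × Int × List (Int × Int)) p =>
      (st.1 - (PySem.Str.len p + 1), st.2.1 - 1,
       st.2.2 ++ [(st.2.1, st.1 - (PySem.Str.len p + 1))]))
    (total, (paragraphs.length : Int), [])
  -- dict(reversed(pairs))
  ((res.2.2.reverse).foldl (fun (d : PySem.Dict Int Int) kv => d.insert kv.1 kv.2)
    PySem.Dict.empty).items

-- ===== PRECONDITION & SPEC =====
def Spec_get_starts_of_paragraphs (paragraphs : List String) (out : List (Int × Int)) : Prop := out = get_starts_of_paragraphs_alt paragraphs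
instance (paragraphs : List String) (out : List (Int × Int)) : Decidable (Spec_get_starts_of_paragraphs paragraphs out) := by unfold Spec_get_starts_of_paragraphs; infer_instance

-- ===== CLAIM (what is proved, stated in full; the proofs are below) =====
def Claim_equal_get_starts_of_paragraphs : Prop := ∀ (paragraphs : List String), Dom_get_starts_of_paragraphs paragraphs → Spec_get_starts_of_paragraphs paragraphs (get_starts_of_paragraphs paragraphs)

-- ===== LEMMAS AND PROOFS =====

-- common reference shape: the association list both programs denote
def pvBuild (i len : Int) : List String → List (Int × Int)
  | [] => []
  | p :: ps => (i, len) :: pvBuild (i + 1) (len + (PySem.Str.len p + 1)) ps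

-- total contribution of a list of paragraphs
def pvS : List String → Int
  | [] => 0
  | p :: ps => (PySem.Str.len p + 1) + pvS ps

lemma pvA_fold (ps : List String) (d : PySem.Dict Int Int) (i len : Int)
    (h : ∀ j : Int, j ∈ d.keys → j < i) :
    ((ps.foldl
      (fun (st : PySem.Dict Int Int × Int × Int) item =>
        (st.1.insert st.2.1 st.2.2, st.2.1 + 1, st.2.2 + (PySem.Str.len item + 1)))
      (d, i, len)).1).items = d.items ++ pvBuild i len ps := by
  induction ps generalizing d i len with
  | nil => simp [pvBuild]
  | cons p ps ih =>
    have hnc : d.contains i = false := by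
      cases hcb : d.contains i with
      | false => rfl
      | true => exact absurd (h i ((PySem.Dict.contains_iff_mem_keys d i).mp hcb)) (lt_irrefl i)
    have hitems := PySem.Dict.items_insert_of_not_contains (d := d) (k := i) (v := len) hnc
    simp only [List.foldl_cons, pvBuild]
    rw [ih]
    · rw [hitems]; simp
    · intro j hj
      rcases (PySem.Dict.mem_keys_insert (d := d) (k := i) (v := len) (k' := j)).mp hj with h1 | h2
      · omega
      · have := h j h2; omega

lemma pvS_foldl (l : List String) (a : Int) :
    l.foldl (fun s p => s + (PySem.Str.len p + 1)) a = a + pvS l := by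
  induction l generalizing a with
  | nil => simp [pvS]
  | cons p l ih => simp only [List.foldl_cons, pvS, ih]; ring

-- invariant of B's backward loop
lemma pvB_loop (qs : List String) (base i : Int) (acc : List (Int × Int)) :
    qs.reverse.foldl
      (fun (st : Int × Int × List (Int × Int)) p =>
        (st.1 - (PySem.Str.len p + 1), st.2.1 - 1,
         st.2.2 ++ [(st.2.1, st.1 - (PySem.Str.len p + 1))]))
      (base + pvS qs, i + (qs.length : Int), acc)
    = (base, i, acc ++ (pvBuild (i + 1) base qs).reverse) := by
  induction qs generalizing base i acc with
  | nil => simp [pvS, pvBuild]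
  | cons q qs ih =>
    have h1 : base + pvS (q :: qs) = (base + (PySem.Str.len q + 1)) + pvS qs := by
      simp [pvS]; ring
    have h2 : i + ((q :: qs).length : Int) = (i + 1) + (qs.length : Int) := by
      simp; ring
    rw [List.reverse_cons, List.foldl_append, h1, h2,
      ih (base + (PySem.Str.len q + 1)) (i + 1) acc]
    simp only [List.foldl_cons, List.foldl_nil, pvBuild, List.reverse_cons]
    refine Prod.ext (by ring_nf) (Prod.ext (by simp) (by simp [List.append_assoc]))

-- keys of pvBuild are bounded below by i
lemma pvBuild_lb (ps : List String) (i len : Int) :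
    ∀ kv ∈ pvBuild i len ps, i ≤ kv.1 := by
  induction ps generalizing i len with
  | nil => simp [pvBuild]
  | cons p ps ih =>
    intro kv hkv
    simp only [pvBuild, List.mem_cons] at hkv
    rcases hkv with h | h
    · simp [h]
    · have := ih (i + 1) (len + (PySem.Str.len p + 1)) kv h; omega

-- keys of pvBuild are pairwise distinct
lemma pvBuild_keys_nodup (ps : List String) (i len : Int) :
    ((pvBuild i len ps).map (fun kv => kv.1)).Nodup := by
  induction ps generalizing i len with
  | nil => simp [pvBuild]
  | cons p ps ih =>
    simp only [pvBuild, List.map_cons, List.nodup_cons]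
    refine ⟨?_, ih (i + 1) (len + (PySem.Str.len p + 1))⟩
    intro hmem
    rcases List.mem_map.mp hmem with ⟨kv, hkv, hk⟩
    have := pvBuild_lb ps (i + 1) (len + (PySem.Str.len p + 1)) kv hkv
    omega

-- ===== VERDICT (by name: the statement is the Claim_ definition above) =====
theorem get_starts_of_paragraphs_spec : Claim_equal_get_starts_of_paragraphs := by
  intro ps _
  show get_starts_of_paragraphs ps = get_starts_of_paragraphs_alt ps
  unfold get_starts_of_paragraphs get_starts_of_paragraphs_alt
  rw [pvA_fold ps PySem.Dict.empty 1 0 (by intro j hj; simp [PySem.Dict.keys_empty] at hj)]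
  have htot : ps.foldl (fun s p => s + (PySem.Str.len p + 1)) 0 = 0 + pvS ps := pvS_foldl ps 0
  have hloop := pvB_loop ps 0 0 []
  simp only [zero_add, List.nil_append] at htot hloop
  simp only [htot, hloop, List.reverse_reverse]
  rw [PySem.Dict.items_foldl_insert_fresh (k := fun kv => kv.1) (v := fun kv => kv.2)
    (l := pvBuild 1 0 ps) (d := PySem.Dict.empty)
    (by intro a _; simp [PySem.Dict.contains_empty]) (pvBuild_keys_nodup ps 1 0)]
  simp
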